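-- pv_equiv track=rewrite | github.com/efcarrizo/UTNfrc | simulacro parcial 2 version 1/simulacro1p2.py | expresion_d
-- ===== SOURCE A (Python) =====
-- def expresion_d(linea):
--
--     vocales = "aeiou"
--
--     #Banderas
--     letra_d = False
--     vocal = False
--     ultima_vocal = False
--     #Contadores
--     cant_d = 0
--     ultima_letra = ""
--     palabras_d = 0
--
--     for l in linea:
--         #Dentro de la palabra
--         if l != " " and l != ".":
--             #Si la letra que ingresa es d, se levanta la bandera
--             if l.lower() == "d":
--                 letra_d = True
--
--             elif letra_d:
--                 if l.lower() in vocales: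
--                     cant_d += 1
--                     letra_d = False
--                 else:
--                     letra_d = False
--
--
--             ultima_letra = l
--         else:
--             if cant_d >= 2:
--                 if ultima_letra in vocales:
--                     palabras_d += 1
--
--             #Resteamos contadores
--             letra_d = False
--             cant_d = 0
--
--     return palabras_d
-- ===== SOURCE B (Python) =====
-- def expresion_d(linea):
--     # Tokenize-then-score: build the completed words (the trailing unfinished
--     # word is never flushed, matching the original), then score each word.
--     palabras = []
--     actual = ""
--     for ch in linea:
--         if ch == " " or ch == ".":
--             palabras.append(actual)
--             actual = ""
--         else:
--             actual += ch
--
--     def puntaje(w):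
--         cant = sum(1 for a, b in zip(w, w[1:])
--                    if a.lower() == "d" and b.lower() in "aeiou")
--         return 1 if cant >= 2 and w[-1] in "aeiou" else 0
--
--     return sum(puntaje(w) for w in palabras)
-- ===== Notes on version B (the rewrite author's own statement) =====
-- stated objective: simpler
-- what changed: Replaces A's single-pass flag/counter state machine (letra_d/cant_d/ultima_letra updated per character) by a tokenize-then-score decomposition: one pass collects the completed words, then each word is scored independently by counting adjacent (d, vowel) pairs over zip(w, w[1:]) and checking its last character.
import Mathlib
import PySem

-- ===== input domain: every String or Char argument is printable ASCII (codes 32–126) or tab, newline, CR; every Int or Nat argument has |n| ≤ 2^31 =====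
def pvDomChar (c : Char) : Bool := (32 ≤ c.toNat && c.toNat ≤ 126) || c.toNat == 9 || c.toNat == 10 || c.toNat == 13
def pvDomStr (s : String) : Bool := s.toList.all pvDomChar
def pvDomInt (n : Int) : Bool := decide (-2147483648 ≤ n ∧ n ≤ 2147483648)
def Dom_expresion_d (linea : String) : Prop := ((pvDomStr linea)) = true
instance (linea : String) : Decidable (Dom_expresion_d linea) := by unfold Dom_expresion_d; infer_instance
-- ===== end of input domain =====

-- B replaces A's inline flag/counter state machine by a tokenize-then-score
-- decomposition (collect each completed word, score it as a whole); objective: simpler.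

-- ===== PORT A =====
def pvVocales : List Char := ['a', 'e', 'i', 'o', 'u']

-- state: (letra_d, cant_d, ultima_letra, palabras_d); ultima_letra is a string of ≤ 1 char
def pvStepA (st : Bool × Int × List Char × Int) (l : Char) : Bool × Int × List Char × Int :=
  let (letra_d, cant_d, ultima, pal) := st
  if l ≠ ' ' ∧ l ≠ '.' then
    if PySem.Chars.lowerChar l == 'd' then (true, cant_d, [l], pal)
    else if letra_d then
      -- 'l.lower() in vocales' : 1-char substring test
      if PySem.Chars.isIn [PySem.Chars.lowerChar l] pvVocales then (false, cant_d + 1, [l], pal)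
      else (false, cant_d, [l], pal)
    else (letra_d, cant_d, [l], pal)
  else
    ( false, 0, ultima
    , if 2 ≤ cant_d then (if PySem.Chars.isIn ultima pvVocales then pal + 1 else pal) else pal )

def expresion_d (linea : String) : Int :=
  (linea.toList.foldl pvStepA (false, 0, ([] : List Char), 0)).2.2.2

-- ===== PORT B =====
-- score of one completed word; w[1:] is ported as w.tail (exact for a char list),
-- w[-1] as PySem.List.pyGet? w (-1), evaluated only when cant ≥ 2 (Python's short-circuit)
def pvPuntaje (w : List Char) : Int :=
  let cant : Int :=
    ((w.zip w.tail).map (fun p =>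
      if (PySem.Chars.lowerChar p.1 == 'd')
          && PySem.Chars.isIn [PySem.Chars.lowerChar p.2] pvVocales then (1 : Int) else 0)).sum
  if 2 ≤ cant ∧ ((PySem.List.pyGet? w (-1)).elim false (fun c => PySem.Chars.isIn [c] pvVocales)) = true
  then 1 else 0

-- tokenizer state: (completed words, current word)
def pvStepB (st : List (List Char) × List Char) (ch : Char) : List (List Char) × List Char :=
  if ch = ' ' ∨ ch = '.' then (st.1 ++ [st.2], ([] : List Char)) else (st.1, st.2 ++ [ch])

def expresion_d_alt (linea : String) : Int :=
  let r := linea.toList.foldl pvStepB (([] : List (List Char)), ([] : List Char))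
  (r.1.map pvPuntaje).sum

-- ===== PRECONDITION & SPEC =====
def Spec_expresion_d (linea : String) (out : Int) : Prop := out = expresion_d_alt linea
instance (linea : String) (out : Int) : Decidable (Spec_expresion_d linea out) := by unfold Spec_expresion_d; infer_instance

-- ===== CLAIM (what is proved, stated in full; the proofs are below) =====
def Claim_equal_expresion_d : Prop := ∀ (linea : String), Dom_expresion_d linea → Spec_expresion_d linea (expresion_d linea)

-- ===== LEMMAS AND PROOFS =====

-- A's letra_d flag after a word: does its last char lower to 'd'?
def pvFlag (w : List Char) : Bool :=
  match w.getLast? with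
  | some c => PySem.Chars.lowerChar c == 'd'
  | none => false

-- A's cant_d after a word: adjacent (d, vowel) pairs
def pvAdj : List Char → Int
  | [] => 0
  | [_] => 0
  | x :: y :: xs =>
      (if (PySem.Chars.lowerChar x == 'd')
          && PySem.Chars.isIn [PySem.Chars.lowerChar y] pvVocales then (1 : Int) else 0)
      + pvAdj (y :: xs)

theorem pvIsIn_singleton (c : Char) (s : List Char) :
    PySem.Chars.isIn [c] s = s.contains c := by
  rcases h : s.contains c with _ | _
  · rw [PySem.Chars.isIn_eq_false_iff]
    intro hinf; simp at h
    exact h (hinf.mem (by simp))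
  · rw [PySem.Chars.isIn_iff_infix]
    simp at h
    obtain ⟨l1, l2, hs⟩ := List.append_of_mem h
    exact ⟨l1, l2, by simp [hs]⟩

theorem pvCant_eq (w : List Char) :
    ((w.zip w.tail).map (fun p =>
      if (PySem.Chars.lowerChar p.1 == 'd')
          && PySem.Chars.isIn [PySem.Chars.lowerChar p.2] pvVocales then (1 : Int) else 0)).sum
      = pvAdj w := by
  induction w using pvAdj.induct with
  | case1 => simp [pvAdj]
  | case2 x => simp [pvAdj]
  | case3 x y xs ih => simp [pvAdj, ← ih]

theorem pvAdj_append (w : List Char) (c : Char) :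
    pvAdj (w ++ [c])
      = pvAdj w
        + (if pvFlag w && PySem.Chars.isIn [PySem.Chars.lowerChar c] pvVocales then (1 : Int) else 0) := by
  induction w using pvAdj.induct with
  | case1 => simp [pvAdj, pvFlag]
  | case2 x => simp [pvAdj, pvFlag]
  | case3 x y xs ih =>
      have hf : pvFlag (x :: y :: xs) = pvFlag (y :: xs) := by
        simp [pvFlag, List.getLast?_cons_cons]
      simp only [List.cons_append] at ih ⊢
      rw [pvAdj, pvAdj, hf, ih]
      ring

theorem pvFlag_append (w : List Char) (c : Char) :
    pvFlag (w ++ [c]) = (PySem.Chars.lowerChar c == 'd') := by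
  unfold pvFlag
  rw [List.getLast?_concat]

theorem pvGet_neg_one (w : List Char) :
    PySem.List.pyGet? w (-1) = w.getLast? := by
  simp [PySem.List.pyGet?, PySem.List.pyIdx?]
  rcases w with _ | ⟨x, xs⟩
  · simp
  · simp [List.getLast?_eq_getElem?]

theorem pvD_not_vow (c : Char) (h : PySem.Chars.lowerChar c == 'd') :
    PySem.Chars.isIn [PySem.Chars.lowerChar c] pvVocales = false := by
  rw [eq_of_beq h, pvIsIn_singleton]
  decide

theorem pvFlush_eq (w u : List Char) (hu : w = [] ∨ u = w.getLast?.toList) :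
    (if 2 ≤ pvAdj w then (if PySem.Chars.isIn u pvVocales then (1:Int) else 0) else 0)
      = pvPuntaje w := by
  have hpt : pvPuntaje w = if 2 ≤ pvAdj w ∧ (w.getLast?.elim false (fun c => PySem.Chars.isIn [c] pvVocales)) = true then (1:Int) else 0 := by
    unfold pvPuntaje
    rw [pvCant_eq, pvGet_neg_one]
  rcases hu with rfl | rfl
  · simp [hpt, pvAdj]
  · rcases hlast : w.getLast? with _ | c
    · have : w = [] := by
        cases w
        · rfl
        · simp at hlast
      subst this
      simp [hpt, pvAdj]
    · rw [hpt, hlast]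
      simp only [Option.toList, Option.elim]
      split_ifs with h1 h2 h3 h3 <;> simp_all

theorem pvSim (cs : List Char) (ws : List (List Char)) (w u : List Char)
    (hu : w = [] ∨ u = w.getLast?.toList) :
    (List.foldl pvStepA (pvFlag w, pvAdj w, u, (ws.map pvPuntaje).sum) cs).2.2.2
      = ((List.foldl pvStepB (ws, w) cs).1.map pvPuntaje).sum := by
  induction cs generalizing ws w u with
  | nil => simp
  | cons c cs ih =>
    by_cases hd : c = ' ' ∨ c = '.'
    · have hnd : ¬ (c ≠ ' ' ∧ c ≠ '.') := by tauto
      have hA : pvStepA (pvFlag w, pvAdj w, u, (ws.map pvPuntaje).sum) c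
          = (pvFlag ([] : List Char), pvAdj ([] : List Char), u, ((ws ++ [w]).map pvPuntaje).sum) := by
        simp only [pvStepA, if_neg hnd, pvFlag, pvAdj, List.map_append, List.sum_append,
          List.map_cons, List.map_nil, List.sum_cons, List.sum_nil]
        rw [← pvFlush_eq w u hu]
        split_ifs <;> simp
      have hB : pvStepB (ws, w) c = (ws ++ [w], ([] : List Char)) := by
        simp [pvStepB, hd]
      rw [List.foldl_cons, List.foldl_cons, hA, hB]
      exact ih (ws ++ [w]) [] u (Or.inl rfl)
    · have hnd : c ≠ ' ' ∧ c ≠ '.' := by tauto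
      have hlast : ([c] : List Char) = (w ++ [c]).getLast?.toList := by
        rw [List.getLast?_concat]; rfl
      have hA : pvStepA (pvFlag w, pvAdj w, u, (ws.map pvPuntaje).sum) c
          = (pvFlag (w ++ [c]), pvAdj (w ++ [c]), [c], (ws.map pvPuntaje).sum) := by
        rw [pvFlag_append, pvAdj_append]
        simp only [pvStepA, if_pos hnd]
        rcases hD : (PySem.Chars.lowerChar c == 'd') with _ | _
        · simp only [Bool.false_eq_true, if_false]
          rcases hf : pvFlag w with _ | _
          · simp
          · rcases hv : PySem.Chars.isIn [PySem.Chars.lowerChar c] pvVocales with _ | _ <;> simp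
        · simp [pvD_not_vow c hD]
      have hB : pvStepB (ws, w) c = (ws, w ++ [c]) := by
        simp [pvStepB, hd]
      rw [List.foldl_cons, List.foldl_cons, hA, hB]
      exact ih ws (w ++ [c]) [c] (Or.inr hlast)

-- ===== VERDICT (by name: the statement is the Claim_ definition above) =====
theorem expresion_d_spec : Claim_equal_expresion_d := by
  intro linea _
  unfold Spec_expresion_d expresion_d expresion_d_alt
  simpa using pvSim linea.toList [] [] [] (Or.inl rfl)
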